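-- pv_equiv track=rewrite | github.com/qizhou/research | zkp/stark/range_stark.py | shift_poly
-- ===== SOURCE A (Python) =====
-- def shift_poly(poly, modulus, factor):
--     factor_power = 1
--     inv_factor = pow(factor, modulus - 2, modulus)
--     o = []
--     for p in poly:
--         o.append(p * factor_power % modulus)
--         factor_power = factor_power * inv_factor % modulus
--     return o
--
-- modulus = 2**256 - 2**32 * 351 + 1
-- ===== SOURCE B (Python) =====
-- def shift_poly(poly, modulus, factor):
--     inv_factor = pow(factor, modulus - 2, modulus)
--     return [p * pow(inv_factor, i, modulus) % modulus for i, p in enumerate(poly)]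
-- ===== Notes on version B (the rewrite author's own statement) =====
-- stated objective: simpler
-- what changed: The running accumulator factor_power threaded through the loop is removed: each coefficient is scaled by an independently computed power pow(inv_factor, i, modulus) in a single enumerate-comprehension.
import Mathlib
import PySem

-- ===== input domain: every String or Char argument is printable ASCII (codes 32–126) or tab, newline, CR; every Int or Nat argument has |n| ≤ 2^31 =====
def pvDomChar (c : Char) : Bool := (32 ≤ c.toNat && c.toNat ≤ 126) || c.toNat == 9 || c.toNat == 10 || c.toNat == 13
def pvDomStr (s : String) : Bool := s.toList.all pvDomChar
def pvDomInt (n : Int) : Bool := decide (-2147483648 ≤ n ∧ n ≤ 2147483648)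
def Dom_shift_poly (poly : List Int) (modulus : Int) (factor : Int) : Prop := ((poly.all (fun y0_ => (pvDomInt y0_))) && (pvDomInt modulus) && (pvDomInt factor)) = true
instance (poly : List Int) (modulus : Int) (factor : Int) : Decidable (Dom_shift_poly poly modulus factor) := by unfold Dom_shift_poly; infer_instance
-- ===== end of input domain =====

-- B drops A's running accumulator factor_power and scales each coefficient by an
-- independently computed power pow(inv_factor, i, modulus) in one enumerate-comprehension
-- (objective: simpler; not claimed faster). Equivalence is about the return value; neither version mutates.

-- ===== PORT A =====
-- Hand port of Python's 3-argument pow(b, e, m): exact whenever Python returns, i.e. for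
-- m ≠ 0 and, when e < 0, gcd(b, m) = 1 (the modular inverse is the Bezout coefficient
-- reduced by Python's mod); elsewhere Python raises and Pre_ excludes the input.
-- Binary exponentiation with reduction at each step, as CPython's pow does; for m ≠ 0 it
-- returns PySem.Int.mod (b ^ e) m (fmod is canonical per residue), evaluable for large e.
def pyPowNat (m : Int) : Int → Nat → Int
  | _, 0 => PySem.Int.mod 1 m
  | b, (e + 1) =>
    let h := pyPowNat m (PySem.Int.mod (b * b) m) ((e + 1) / 2)
    if (e + 1) % 2 = 1 then PySem.Int.mod (b * h) m else h
  decreasing_by omega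

def pyPow (b e m : Int) : Int :=
  if 0 ≤ e then pyPowNat m b e.toNat
  else pyPowNat m (PySem.Int.mod (Int.gcdA b m) m) (-e).toNat

def shift_poly (poly : List Int) (modulus : Int) (factor : Int) : List Int :=
  let inv_factor := pyPow factor (modulus - 2) modulus
  (poly.foldl
    (fun st p => (st.1 ++ [PySem.Int.mod (p * st.2) modulus],
                  PySem.Int.mod (st.2 * inv_factor) modulus))
    (([] : List Int), (1 : Int))).1

-- ===== PORT B =====
def shift_poly_alt (poly : List Int) (modulus : Int) (factor : Int) : List Int :=
  let inv_factor := pyPow factor (modulus - 2) modulus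
  (PySem.List.enumerate poly).map
    (fun ip => PySem.Int.mod (ip.2 * PySem.Int.powMod inv_factor ip.1.toNat modulus) modulus)

-- ===== PRECONDITION & SPEC =====
-- Pre_ is exactly the set of inputs on which Python A returns: pow raises ZeroDivisionError
-- when modulus = 0, and ValueError when the exponent modulus-2 is negative (modulus < 2)
-- while factor is not invertible modulo modulus.
def Pre_shift_poly (poly : List Int) (modulus : Int) (factor : Int) : Prop :=
  modulus ≠ 0 ∧ (2 ≤ modulus ∨ Int.gcd factor modulus = 1)
instance (poly : List Int) (modulus : Int) (factor : Int) : Decidable (Pre_shift_poly poly modulus factor) := by unfold Pre_shift_poly; infer_instance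

def pvWitness_shift_poly : List Int × Int × Int := ([3, 1, 4, 1, 5], 7, 2)

def Spec_shift_poly (poly : List Int) (modulus : Int) (factor : Int) (out : List Int) : Prop := out = shift_poly_alt poly modulus factor
instance (poly : List Int) (modulus : Int) (factor : Int) (out : List Int) : Decidable (Spec_shift_poly poly modulus factor out) := by unfold Spec_shift_poly; infer_instance

-- ===== CLAIM (what is proved, stated in full; the proofs are below) =====
def Claim_equal_shift_poly : Prop := ∀ (poly : List Int) (modulus : Int) (factor : Int), Dom_shift_poly poly modulus factor → Pre_shift_poly poly modulus factor → Spec_shift_poly poly modulus factor (shift_poly poly modulus factor)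

-- ===== LEMMAS AND PROOFS =====

-- Python's mod (fmod) differs from emod by 0 or m, so reducing again with emod gives emod.
theorem pv_fmod_emod (z m : Int) : (z.fmod m) % m = z % m := by
  rw [Int.fmod_eq_emod]
  split_ifs with h
  · simp
  · have : z % m + m = z % m + m * 1 := by ring
    rw [this, Int.add_mul_emod_self_left]
    exact Int.emod_emod_of_dvd z dvd_rfl

-- fmod is determined by emod residue.
theorem pv_fmod_congr {a b : Int} (m : Int) (h : a % m = b % m) : a.fmod m = b.fmod m := by
  rw [Int.fmod_eq_emod, Int.fmod_eq_emod, h]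
  have hd : m ∣ a ↔ m ∣ b := by
    rw [Int.dvd_iff_emod_eq_zero, Int.dvd_iff_emod_eq_zero, h]
  by_cases h0 : 0 ≤ m
  · simp [h0]
  · simp [h0, hd]

-- A's loop, started with any accumulator congruent to inv^i, produces exactly B's
-- per-index powers from index i on.
theorem pv_loop_eq (m inv : Int) (l : List Int) :
    ∀ (i : Int), 0 ≤ i → ∀ (acc : List Int) (fp : Int), fp % m = (inv ^ i.toNat) % m →
    (l.foldl
      (fun st p => (st.1 ++ [PySem.Int.mod (p * st.2) m], PySem.Int.mod (st.2 * inv) m))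
      (acc, fp)).1
    = acc ++ (PySem.List.enumerate l i).map
        (fun ip => PySem.Int.mod (ip.2 * PySem.Int.powMod inv ip.1.toNat m) m) := by
  induction l with
  | nil => intro i _ acc fp _; simp [PySem.List.enumerate]
  | cons x t ih =>
    intro i hi acc fp h
    have htoNat : (i + 1).toNat = i.toNat + 1 := by omega
    have hstep : (PySem.Int.mod (fp * inv) m) % m = (inv ^ (i + 1).toNat) % m := by
      show ((fp * inv).fmod m) % m = _
      rw [pv_fmod_emod, Int.mul_emod, h, ← Int.mul_emod, htoNat, pow_succ]
    have helem : PySem.Int.mod (x * fp) m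
        = PySem.Int.mod (x * PySem.Int.powMod inv i.toNat m) m := by
      show (x * fp).fmod m = (x * ((inv ^ i.toNat).fmod m)).fmod m
      refine pv_fmod_congr m ?_
      rw [Int.mul_emod, h, Int.mul_emod x ((inv ^ i.toNat).fmod m), pv_fmod_emod]
    simp only [List.foldl_cons]
    rw [ih (i + 1) (by omega) (acc ++ [PySem.Int.mod (x * fp) m]) _ hstep]
    simp [PySem.List.enumerate, helem]

-- ===== VERDICT (by name: the statement is the Claim_ definition above) =====
theorem shift_poly_spec : Claim_equal_shift_poly := by
  intro poly modulus factor _ _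
  show shift_poly poly modulus factor = shift_poly_alt poly modulus factor
  unfold shift_poly shift_poly_alt
  exact pv_loop_eq modulus (pyPow factor (modulus - 2) modulus) poly 0 le_rfl [] 1 (by simp)
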